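-- pv_equiv track=rewrite | github.com/Stokalas/bioinfo_1lab | main.py | find_start_stop
-- ===== SOURCE A (Python) =====
-- def find_start_stop(strand):
--     START = "ATG"
--     STOP = ["TAA", "TAG", "TGA"]
--     length = len(strand)
--
--     rez = []
--
--     for i in range(0,3):
--         j = i
--         temp = []
--
--         while j < length-2:
--             codon = strand[j:j+3]
--             if codon == START:
--                 temp.append(('START', j))
--             elif codon in STOP:
--                 temp.append(('STOP', j))
--
--             j += 3
--
--
--         searching_stop = False
--         start_index = 0
--         for codon in temp:
--             type, pos = codon
--             if searching_stop == False and type == 'START':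
--                 searching_stop = True
--                 start_index = pos
--             elif searching_stop == True and type == 'STOP':
--                 rez.append((start_index, pos))
--                 searching_stop = False
--
--     return rez
-- ===== SOURCE B (Python) =====
-- def find_start_stop(strand):
--     STOP = ("TAA", "TAG", "TGA")
--     n = len(strand)
--     rez = []
--     for i in range(3):
--         searching = False
--         start_index = 0
--         j = i
--         while j < n - 2:
--             codon = strand[j:j+3]
--             if codon == "ATG" and not searching:
--                 searching = True
--                 start_index = j
--             elif searching and codon in STOP:
--                 rez.append((start_index, j))
--                 searching = False
--             j += 3
--     return rez
-- ===== Notes on version B (the rewrite author's own statement) =====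
-- stated objective: simpler
-- what changed: Replaced A's two-phase per-frame processing (collect START/STOP events into a temp list, then pair them in a second fold) with a single codon-stepping loop per frame that maintains searching/start_index inline and emits pairs directly, eliminating the intermediate event list.
import Mathlib
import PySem

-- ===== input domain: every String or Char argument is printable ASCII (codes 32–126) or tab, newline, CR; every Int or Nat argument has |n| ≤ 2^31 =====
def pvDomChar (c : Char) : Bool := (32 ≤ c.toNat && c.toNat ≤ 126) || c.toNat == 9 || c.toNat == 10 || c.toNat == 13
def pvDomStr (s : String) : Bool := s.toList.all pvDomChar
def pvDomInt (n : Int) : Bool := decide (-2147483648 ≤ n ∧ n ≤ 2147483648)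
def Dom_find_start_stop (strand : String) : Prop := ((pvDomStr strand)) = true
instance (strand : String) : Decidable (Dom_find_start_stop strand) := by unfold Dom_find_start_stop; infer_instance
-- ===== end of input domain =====

-- B replaces A's two-phase frame processing (event list + pairing fold) with one inline
-- codon-stepping loop per frame; objective: simpler (no intermediate list). Same return value.

-- ===== PORT A =====
-- the STOP codon list (Python: STOP = ["TAA", "TAG", "TGA"]); string comparison done on char lists
def pvSTOPS : List (List Char) := ["TAA".toList, "TAG".toList, "TGA".toList]

-- A's inner while loop: collect ('START', j) / ('STOP', j) events stepping j by 3.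
-- fuel is only a termination guard (cs.length iterations always suffice: the loop runs at most ⌈len/3⌉ times).
def pvTempLoop (cs : List Char) : Nat → Int → List (String × Int)
  | 0, _ => []
  | fuel + 1, j =>
    if j < (cs.length : Int) - 2 then
      let codon := PySem.List.slice cs (some j) (some (j + 3))
      (if codon = "ATG".toList then [("START", j)]
       else if codon ∈ pvSTOPS then [("STOP", j)]
       else []) ++ pvTempLoop cs fuel (j + 3)
    else []

-- A's second phase: the pairing fold over temp (state: searching_stop, start_index, rez)
def pvPairStep (acc : Bool × Int × List (Int × Int)) (ev : String × Int) :
    Bool × Int × List (Int × Int) :=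
  match acc, ev with
  | (searching, si, rez), (ty, pos) =>
    if searching = false ∧ ty = "START" then (true, pos, rez)
    else if searching = true ∧ ty = "STOP" then (false, si, rez ++ [(si, pos)])
    else (searching, si, rez)

def find_start_stop (strand : String) : List (Int × Int) :=
  let cs := strand.toList
  (PySem.List.pyRange 0 3 1).foldl
    (fun rez i => ((pvTempLoop cs cs.length i).foldl pvPairStep (false, 0, rez)).2.2) []

-- ===== PORT B =====
-- B's single per-frame loop: step j by 3, maintain searching/start_index inline (same fuel guard)
def pvAltLoop (cs : List Char) : Nat → Int → Bool → Int → List (Int × Int) → List (Int × Int)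
  | 0, _, _, _, rez => rez
  | fuel + 1, j, searching, si, rez =>
    if j < (cs.length : Int) - 2 then
      let codon := PySem.List.slice cs (some j) (some (j + 3))
      if codon = "ATG".toList ∧ searching = false then
        pvAltLoop cs fuel (j + 3) true j rez
      else if searching = true ∧ codon ∈ pvSTOPS then
        pvAltLoop cs fuel (j + 3) false si (rez ++ [(si, j)])
      else
        pvAltLoop cs fuel (j + 3) searching si rez
    else rez

def find_start_stop_alt (strand : String) : List (Int × Int) :=
  let cs := strand.toList
  (PySem.List.pyRange 0 3 1).foldl (fun rez i => pvAltLoop cs cs.length i false 0 rez) []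

-- ===== PRECONDITION & SPEC =====
def Spec_find_start_stop (strand : String) (out : List (Int × Int)) : Prop := out = find_start_stop_alt strand
instance (strand : String) (out : List (Int × Int)) : Decidable (Spec_find_start_stop strand out) := by unfold Spec_find_start_stop; infer_instance

-- ===== CLAIM (what is proved, stated in full; the proofs are below) =====
def Claim_equal_find_start_stop : Prop := ∀ (strand : String), Dom_find_start_stop strand → Spec_find_start_stop strand (find_start_stop strand)

-- ===== LEMMAS AND PROOFS =====

-- one frame: pairing A's event list equals B's inline loop, for any carried state
theorem pv_frame_eq (cs : List Char) (fuel : Nat) :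
    ∀ (j : Int) (s : Bool) (si : Int) (rez : List (Int × Int)),
      ((pvTempLoop cs fuel j).foldl pvPairStep (s, si, rez)).2.2 = pvAltLoop cs fuel j s si rez := by
  induction fuel with
  | zero => intro j s si rez; simp [pvTempLoop, pvAltLoop]
  | succ fuel ih =>
    intro j s si rez
    rw [pvTempLoop, pvAltLoop]
    by_cases h : j < (cs.length : Int) - 2
    · generalize PySem.List.slice cs (some j) (some (j + 3)) = codon
      by_cases hA : codon = ['A', 'T', 'G']
      · subst hA
        cases s with
        | false => simp [h, pvPairStep, ih]
        | true =>
          have hns : ¬ (['A', 'T', 'G'] ∈ pvSTOPS) := by decide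
          simp [h, pvPairStep, ih, hns]
      · by_cases hS : codon ∈ pvSTOPS
        · cases s with
          | false => simp [h, pvPairStep, ih, hA, hS]
          | true => simp [h, pvPairStep, ih, hA, hS]
        · cases s with
          | false => simp [h, ih, hA, hS]
          | true => simp [h, ih, hA, hS]
    · simp [h]

theorem pv_range3 : PySem.List.pyRange 0 3 1 = [0, 1, 2] := by decide

-- ===== VERDICT (by name: the statement is the Claim_ definition above) =====
theorem find_start_stop_spec : Claim_equal_find_start_stop := by
  intro strand _
  unfold Spec_find_start_stop find_start_stop find_start_stop_alt
  simp only [pv_range3, List.foldl]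
  simp only [pv_frame_eq]
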